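-- pv_equiv track=rewrite | github.com/aidamzz/algorithm | Quera/CodeCup8DastGarmi/TabdilBeDrakht.py | dfs
-- ===== SOURCE A (Python) =====
-- def dfs(node, graph, visited):
--     stack = [node]
--     visited[node] = True
--     edges_count = 0
--
--     while stack:
--         u = stack.pop()
--         for v in graph[u]:
--             edges_count += 1
--             if not visited[v]:
--                 visited[v] = True
--                 stack.append(v)
--
--     return edges_count // 2  # Each edge counted twice in undirected graph
-- ===== SOURCE B (Python) =====
-- def dfs(node, graph, visited):
--     # Recursive DFS: pre-mark each node's unvisited neighbours, then visit them
--     # newest-first, adding len(graph[u]) per visited node; total // 2.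
--     # Mutates `visited` the same way A does. May hit Python's recursion limit
--     # on very deep components, where the iterative original does not.
--     visited[node] = True
--     def visit(u):
--         count = len(graph[u])
--         newly = []
--         for v in graph[u]:
--             if not visited[v]:
--                 visited[v] = True
--                 newly.append(v)
--         for w in reversed(newly):
--             count += visit(w)
--         return count
--     return visit(node) // 2
-- ===== Notes on version B (the rewrite author's own statement) =====
-- stated objective: alternative
-- what changed: Replaces A's explicit-stack while-loop that increments a counter once per traversed edge endpoint by a recursive DFS helper that pre-marks each node's unvisited neighbours, adds len(graph[u]) per node, and recurses into the newly discovered neighbours newest-first.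
import Mathlib
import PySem

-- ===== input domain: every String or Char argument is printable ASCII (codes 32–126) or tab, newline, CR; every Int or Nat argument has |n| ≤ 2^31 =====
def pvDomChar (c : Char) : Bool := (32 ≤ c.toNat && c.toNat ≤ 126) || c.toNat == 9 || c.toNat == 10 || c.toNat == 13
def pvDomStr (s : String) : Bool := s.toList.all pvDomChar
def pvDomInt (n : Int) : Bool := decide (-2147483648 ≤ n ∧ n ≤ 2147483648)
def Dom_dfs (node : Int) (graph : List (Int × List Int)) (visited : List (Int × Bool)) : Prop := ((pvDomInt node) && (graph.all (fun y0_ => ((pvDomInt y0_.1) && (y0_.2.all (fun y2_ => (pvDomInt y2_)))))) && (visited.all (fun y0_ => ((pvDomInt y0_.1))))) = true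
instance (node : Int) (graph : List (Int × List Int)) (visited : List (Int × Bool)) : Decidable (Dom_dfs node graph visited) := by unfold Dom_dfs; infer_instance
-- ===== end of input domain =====

-- B replaces A's explicit-stack loop with per-edge counting by a recursive DFS that
-- pre-marks each node's unvisited neighbours and adds len(graph[u]) per node ('alternative',
-- not faster). Both A and B mutate `visited` (identically on Pre_); the equivalence proved
-- here is about the return value. The Lean ports make the traversal total with a fuel
-- argument that is proved sufficient (a totality guard only, not an algorithm change).

-- ===== PORT A =====
-- graph[u] (KeyError for a missing key — excluded by Pre_dfs; ported with default [])
def pvNbrs (graph : List (Int × List Int)) (u : Int) : List Int :=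
  ((PySem.Dict.mk graph).get? u).getD []

-- number of keys of `vis` currently mapped to False — the fuel measure
def pvU (vis : PySem.Dict Int Bool) : Nat :=
  (vis.keys.filter (fun k => vis.getD k true == false)).length

-- body of A's `for v in graph[u]` over the state (visited, stack, edges_count);
-- the stack is represented top-first (Python appends/pops at the end), and
-- `visited[v]` (KeyError for a missing key — excluded by Pre_dfs) is read with default True
def pvStepA (st : PySem.Dict Int Bool × List Int × Int) (v : Int) :
    PySem.Dict Int Bool × List Int × Int :=
  let cnt := st.2.2 + 1
  if !(st.1.getD v true) then (st.1.insert v true, v :: st.2.1, cnt) else (st.1, st.2.1, cnt)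

-- A's `while stack` loop; the fuel only makes it total (proved sufficient below)
def pvLoopA (graph : List (Int × List Int)) :
    Nat → List Int → PySem.Dict Int Bool → Int → Int × PySem.Dict Int Bool
  | 0, _, vis, cnt => (cnt, vis)
  | _ + 1, [], vis, cnt => (cnt, vis)
  | f + 1, u :: rest, vis, cnt =>
    let st := (pvNbrs graph u).foldl pvStepA (vis, rest, cnt)
    pvLoopA graph f st.2.1 st.1 st.2.2

def dfs (node : Int) (graph : List (Int × List Int)) (visited : List (Int × Bool)) : Int :=
  let vis0 := (PySem.Dict.mk visited).insert node true
  PySem.Int.floordiv (pvLoopA graph (1 + pvU vis0) [node] vis0 0).1 2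

-- ===== PORT B =====
-- body of B's `for v in graph[u]` over the state (newly, visited)
def pvCollect (st : List Int × PySem.Dict Int Bool) (v : Int) :
    List Int × PySem.Dict Int Bool :=
  if !(st.2.getD v true) then (st.1 ++ [v], st.2.insert v true) else st

-- B's recursive `visit`, returning (count, visited); fueled for totality only
def pvVisitB (graph : List (Int × List Int)) :
    Nat → Int → PySem.Dict Int Bool → Int × PySem.Dict Int Bool
  | 0, _, vis => (0, vis)
  | f + 1, u, vis =>
    let L := pvNbrs graph u
    let c := L.foldl pvCollect ([], vis)
    c.1.reverse.foldl
      (fun acc w => ((acc.1 + (pvVisitB graph f w acc.2).1, (pvVisitB graph f w acc.2).2)))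
      ((L.length : Int), c.2)

def dfs_alt (node : Int) (graph : List (Int × List Int)) (visited : List (Int × Bool)) : Int :=
  let vis0 := (PySem.Dict.mk visited).insert node true
  PySem.Int.floordiv (pvVisitB graph (pvU vis0 + 1) node vis0).1 2

-- ===== PRECONDITION & SPEC =====
-- one saturation round of the component reachable from `node`: following edges into
-- nodes whose visited entry (after visited[node] = True) is False
def pvReachStep (graph : List (Int × List Int)) (vis0 : PySem.Dict Int Bool) (S : List Int) : List Int :=
  S ++ (graph.flatMap (fun p => if p.1 ∈ S then p.2 else [])).filter
      (fun v => decide (v ∉ S) && (vis0.getD v true == false))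

def pvReach (node : Int) (graph : List (Int × List Int)) (visited : List (Int × Bool)) : List Int :=
  (pvReachStep graph ((PySem.Dict.mk visited).insert node true))^[graph.length + visited.length + 1] [node]

-- Pre_dfs = exactly the inputs on which A returns normally: A raises KeyError iff some
-- node of the component reachable from `node` is missing from graph, or one of that
-- component's neighbours is missing from visited (after visited[node] = True)
def Pre_dfs (node : Int) (graph : List (Int × List Int)) (visited : List (Int × Bool)) : Prop :=
  ∀ u ∈ pvReach node graph visited,
    (PySem.Dict.mk graph).contains u = true ∧
    ∀ v ∈ ((PySem.Dict.mk graph).get? u).getD [],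
      ((PySem.Dict.mk visited).insert node true).contains v = true
instance (node : Int) (graph : List (Int × List Int)) (visited : List (Int × Bool)) : Decidable (Pre_dfs node graph visited) := by unfold Pre_dfs; infer_instance

def pvWitness_dfs : Int × (List (Int × List Int)) × (List (Int × Bool)) :=
  (0, [(0, [1]), (1, [0, 1])], [(0, false), (1, false)])

def Spec_dfs (node : Int) (graph : List (Int × List Int)) (visited : List (Int × Bool)) (out : Int) : Prop := out = dfs_alt node graph visited
instance (node : Int) (graph : List (Int × List Int)) (visited : List (Int × Bool)) (out : Int) : Decidable (Spec_dfs node graph visited out) := by unfold Spec_dfs; infer_instance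

-- ===== CLAIM (what is proved, stated in full; the proofs are below) =====
def Claim_equal_dfs : Prop := ∀ (node : Int) (graph : List (Int × List Int)) (visited : List (Int × Bool)), Dom_dfs node graph visited → Pre_dfs node graph visited → Spec_dfs node graph visited (dfs node graph visited)

-- ===== LEMMAS AND PROOFS =====

theorem pvFilterLenMono {p q : Int → Bool} :
    ∀ l : List Int, (∀ a ∈ l, p a = true → q a = true) →
      (l.filter p).length ≤ (l.filter q).length := by
  intro l h
  induction l with
  | nil => simp
  | cons a l ih =>
    have ih' := ih (fun a ha => h a (List.mem_cons_of_mem _ ha))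
    by_cases hp : p a = true
    · have hq := h a (List.mem_cons_self) hp
      simp [List.filter, hp, hq]; omega
    · simp only [List.filter]
      cases hqa : q a <;> simp [hp] <;> omega

theorem pvFilterLenLt {p q : Int → Bool} :
    ∀ l : List Int, (∀ a ∈ l, p a = true → q a = true) →
      ∀ a0 ∈ l, q a0 = true → p a0 = false →
      (l.filter p).length < (l.filter q).length := by
  intro l h a0 hmem hq hp
  induction l with
  | nil => simp at hmem
  | cons a l ih =>
    have hmono := pvFilterLenMono l (fun a ha => h a (List.mem_cons_of_mem _ ha))
    rcases List.mem_cons.mp hmem with rfl | hmem'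
    · simp [List.filter, hp, hq]; omega
    · have ih' := ih (fun a ha => h a (List.mem_cons_of_mem _ ha)) hmem'
      by_cases hpa : p a = true
      · have hqa := h a (List.mem_cons_self) hpa
        simp [List.filter, hpa, hqa]; omega
      · simp only [List.filter]
        cases hqa : q a <;> simp [hpa] <;> omega

theorem pvU_insert_true_lt (vis : PySem.Dict Int Bool) (v : Int)
    (h : vis.getD v true = false) : pvU (vis.insert v true) < pvU vis := by
  have hc : vis.contains v = true := by
    by_contra hc
    have := PySem.Dict.getD_of_not_contains vis (ν := Bool) (k := v) true (by simpa using hc)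
    rw [this] at h; cases h
  have hmem : v ∈ vis.keys := (PySem.Dict.contains_iff_mem_keys vis v).mp hc
  unfold pvU
  rw [PySem.Dict.keys_insert_of_contains vis true hc]
  apply pvFilterLenLt vis.keys _ v hmem
  · simp [h]
  · simp
  · intro a _ ha
    rw [PySem.Dict.getD_insert] at ha
    by_cases hav : a = v
    · simp [hav] at ha
    · simpa [hav] using ha

-- the collect fold with a general accumulator
theorem pvCollect_acc : ∀ (L ny : List Int) (vis : PySem.Dict Int Bool),
    L.foldl pvCollect (ny, vis) =
      (ny ++ (L.foldl pvCollect ([], vis)).1, (L.foldl pvCollect ([], vis)).2) := by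
  intro L
  induction L with
  | nil => simp
  | cons v L ih =>
    intro ny vis
    simp only [List.foldl]
    by_cases h : vis.getD v true = false
    · simp only [pvCollect, h, Bool.not_false, reduceIte, List.nil_append]
      rw [ih (ny ++ [v]), ih [v]]
      simp
    · have h' : vis.getD v true = true := by
        cases hx : vis.getD v true
        · exact absurd hx h
        · rfl
      simp only [pvCollect, h', Bool.not_true]
      exact ih ny vis

theorem pvCollect_measure : ∀ (L ny : List Int) (vis : PySem.Dict Int Bool),
    (L.foldl pvCollect (ny, vis)).1.length + pvU (L.foldl pvCollect (ny, vis)).2 ≤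
      ny.length + pvU vis := by
  intro L
  induction L with
  | nil => simp
  | cons v L ih =>
    intro ny vis
    simp only [List.foldl]
    by_cases h : vis.getD v true = false
    · simp only [pvCollect, h, Bool.not_false, reduceIte]
      have := ih (ny ++ [v]) (vis.insert v true)
      have hlt := pvU_insert_true_lt vis v h
      simp only [List.length_append, List.length_cons, List.length_nil] at this ⊢
      omega
    · have h' : vis.getD v true = true := by
        cases hx : vis.getD v true
        · exact absurd hx h
        · rfl
      simp only [pvCollect, h', Bool.not_true]
      exact ih ny vis

-- A's inner for-loop expressed through B's collect
theorem pvInnerA_eq : ∀ (L : List Int) (vis : PySem.Dict Int Bool) (rest : List Int) (cnt : Int),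
    L.foldl pvStepA (vis, rest, cnt) =
      ((L.foldl pvCollect ([], vis)).2,
       (L.foldl pvCollect ([], vis)).1.reverse ++ rest,
       cnt + L.length) := by
  intro L
  induction L with
  | nil => intro vis rest cnt; simp
  | cons v L ih =>
    intro vis rest cnt
    simp only [List.foldl]
    by_cases h : vis.getD v true = false
    · simp only [pvStepA, pvCollect, h, Bool.not_false, reduceIte, List.nil_append]
      rw [ih, pvCollect_acc L [v]]
      simp only [Prod.mk.injEq, List.reverse_cons, List.nil_append, List.length_cons,
        List.append_assoc, List.cons_append]
      and_intros <;> first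
        | rfl
        | trivial
        | (push_cast; ring)
    · have h' : vis.getD v true = true := by
        cases hx : vis.getD v true
        · exact absurd hx h
        · rfl
      simp only [pvStepA, pvCollect, h', Bool.not_true]
      rw [ih]
      simp only [Prod.mk.injEq, List.length_cons]
      and_intros <;> first
        | rfl
        | trivial
        | (push_cast; ring)

theorem pvLoopA_nil (graph : List (Int × List Int)) :
    ∀ (f : Nat) (vis : PySem.Dict Int Bool) (cnt : Int),
      pvLoopA graph f [] vis cnt = (cnt, vis) := by
  intro f vis cnt
  cases f <;> rfl

-- the inner fold of pvVisitB, named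
def pvFoldV (graph : List (Int × List Int)) (f : Nat) (ws : List Int)
    (p : Int × PySem.Dict Int Bool) : Int × PySem.Dict Int Bool :=
  ws.foldl
    (fun acc w => ((acc.1 + (pvVisitB graph f w acc.2).1, (pvVisitB graph f w acc.2).2)))
    p

theorem pvVisitB_succ (graph : List (Int × List Int)) (f : Nat) (u : Int)
    (vis : PySem.Dict Int Bool) :
    pvVisitB graph (f + 1) u vis =
      pvFoldV graph f ((pvNbrs graph u).foldl pvCollect ([], vis)).1.reverse
        (((pvNbrs graph u).length : Int),
         ((pvNbrs graph u).foldl pvCollect ([], vis)).2) := rfl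

theorem pvFoldV_U_le (graph : List (Int × List Int)) (f : Nat)
    (hP : ∀ (u : Int) (vis : PySem.Dict Int Bool), pvU (pvVisitB graph f u vis).2 ≤ pvU vis) :
    ∀ (ws : List Int) (c : Int) (vis : PySem.Dict Int Bool),
      pvU (pvFoldV graph f ws (c, vis)).2 ≤ pvU vis := by
  intro ws
  induction ws with
  | nil => intro c vis; simp [pvFoldV]
  | cons w ws ih =>
    intro c vis
    simp only [pvFoldV, List.foldl]
    have h1 := hP w vis
    have h2 := ih (c + (pvVisitB graph f w vis).1) (pvVisitB graph f w vis).2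
    simp only [pvFoldV] at h2
    omega

theorem pvVisitB_U_le (graph : List (Int × List Int)) :
    ∀ (f : Nat) (u : Int) (vis : PySem.Dict Int Bool),
      pvU (pvVisitB graph f u vis).2 ≤ pvU vis := by
  intro f
  induction f with
  | zero => intro u vis; simp [pvVisitB]
  | succ f ih =>
    intro u vis
    rw [pvVisitB_succ]
    have hm := pvCollect_measure (pvNbrs graph u) [] vis
    simp only [List.length_nil, Nat.zero_add] at hm
    have := pvFoldV_U_le graph f ih
      ((pvNbrs graph u).foldl pvCollect ([], vis)).1.reverse
      ((pvNbrs graph u).length : Int)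
      ((pvNbrs graph u).foldl pvCollect ([], vis)).2
    omega

theorem pvFoldV_fuel_step (graph : List (Int × List Int)) (f : Nat)
    (hstep : ∀ (u : Int) (vis : PySem.Dict Int Bool), pvU vis + 1 ≤ f →
      pvVisitB graph (f + 1) u vis = pvVisitB graph f u vis) :
    ∀ (ws : List Int) (c : Int) (vis : PySem.Dict Int Bool), pvU vis + 1 ≤ f →
      pvFoldV graph (f + 1) ws (c, vis) = pvFoldV graph f ws (c, vis) := by
  intro ws
  induction ws with
  | nil => intro c vis _; rfl
  | cons w ws ih =>
    intro c vis h
    simp only [pvFoldV, List.foldl]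
    rw [hstep w vis h]
    have hle := pvVisitB_U_le graph f w vis
    exact ih (c + (pvVisitB graph f w vis).1) (pvVisitB graph f w vis).2 (by omega)

theorem pvVisitB_fuel_step (graph : List (Int × List Int)) :
    ∀ (f : Nat) (u : Int) (vis : PySem.Dict Int Bool), pvU vis + 1 ≤ f →
      pvVisitB graph (f + 1) u vis = pvVisitB graph f u vis := by
  intro f
  induction f with
  | zero => intro u vis h; omega
  | succ f ih =>
    intro u vis h
    rw [pvVisitB_succ, pvVisitB_succ]
    rcases hn : ((pvNbrs graph u).foldl pvCollect ([], vis)).1 with _ | ⟨w, ws⟩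
    · simp [pvFoldV]
    · have hm := pvCollect_measure (pvNbrs graph u) [] vis
      simp only [List.length_nil, Nat.zero_add, hn, List.length_cons] at hm
      exact pvFoldV_fuel_step graph f ih _ _ _ (by omega)

theorem pvVisitB_suff (graph : List (Int × List Int)) :
    ∀ (f : Nat) (u : Int) (vis : PySem.Dict Int Bool), pvU vis + 1 ≤ f →
      pvVisitB graph f u vis = pvVisitB graph (pvU vis + 1) u vis := by
  intro f
  induction f with
  | zero => intro u vis h; omega
  | succ f ih =>
    intro u vis h
    by_cases he : pvU vis + 1 = f + 1
    · rw [he]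
    · have hle : pvU vis + 1 ≤ f := by omega
      rw [pvVisitB_fuel_step graph f u vis hle]
      exact ih u vis hle

-- fuel-independent versions
def pvVis (graph : List (Int × List Int)) (u : Int) (vis : PySem.Dict Int Bool) :
    Int × PySem.Dict Int Bool :=
  pvVisitB graph (pvU vis + 1) u vis

def pvFoldVis (graph : List (Int × List Int)) (ws : List Int)
    (p : Int × PySem.Dict Int Bool) : Int × PySem.Dict Int Bool :=
  ws.foldl (fun acc w => ((acc.1 + (pvVis graph w acc.2).1, (pvVis graph w acc.2).2))) p

theorem pvVis_U_le (graph : List (Int × List Int)) (u : Int) (vis : PySem.Dict Int Bool) :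
    pvU (pvVis graph u vis).2 ≤ pvU vis := pvVisitB_U_le graph _ u vis

theorem pvFoldV_eq_foldVis (graph : List (Int × List Int)) (f : Nat) :
    ∀ (ws : List Int) (c : Int) (vis : PySem.Dict Int Bool), pvU vis + 1 ≤ f →
      pvFoldV graph f ws (c, vis) = pvFoldVis graph ws (c, vis) := by
  intro ws
  induction ws with
  | nil => intro c vis _; rfl
  | cons w ws ih =>
    intro c vis h
    simp only [pvFoldV, pvFoldVis, List.foldl]
    have h1 : pvVisitB graph f w vis = pvVis graph w vis := pvVisitB_suff graph f w vis h
    rw [h1]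
    have hle := pvVis_U_le graph w vis
    have := ih (c + (pvVis graph w vis).1) (pvVis graph w vis).2 (by omega)
    simpa [pvFoldV, pvFoldVis] using this

theorem pvVis_eq (graph : List (Int × List Int)) (u : Int) (vis : PySem.Dict Int Bool) :
    pvVis graph u vis =
      pvFoldVis graph ((pvNbrs graph u).foldl pvCollect ([], vis)).1.reverse
        (((pvNbrs graph u).length : Int),
         ((pvNbrs graph u).foldl pvCollect ([], vis)).2) := by
  unfold pvVis
  rw [pvVisitB_succ]
  rcases hn : ((pvNbrs graph u).foldl pvCollect ([], vis)).1 with _ | ⟨w, ws⟩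
  · simp [pvFoldV, pvFoldVis]
  · have hm := pvCollect_measure (pvNbrs graph u) [] vis
    simp only [List.length_nil, Nat.zero_add, hn, List.length_cons] at hm
    exact pvFoldV_eq_foldVis graph (pvU vis) _ _ _ (by omega)

theorem pvFoldVis_shift (graph : List (Int × List Int)) :
    ∀ (ws : List Int) (a c : Int) (vis : PySem.Dict Int Bool),
      pvFoldVis graph ws (a + c, vis) =
        (a + (pvFoldVis graph ws (c, vis)).1, (pvFoldVis graph ws (c, vis)).2) := by
  intro ws
  induction ws with
  | nil => intro a c vis; rfl
  | cons w ws ih =>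
    intro a c vis
    simp only [pvFoldVis, List.foldl]
    have : a + c + (pvVis graph w vis).1 = a + (c + (pvVis graph w vis).1) := by ring
    rw [this]
    have := ih a (c + (pvVis graph w vis).1) (pvVis graph w vis).2
    simpa [pvFoldVis] using this

theorem pvFoldVis_append (graph : List (Int × List Int)) (xs ys : List Int)
    (p : Int × PySem.Dict Int Bool) :
    pvFoldVis graph (xs ++ ys) p = pvFoldVis graph ys (pvFoldVis graph xs p) := by
  simp [pvFoldVis, List.foldl_append]

-- the main bisimulation: A's stack loop equals the fold of B's recursive visits
theorem pvMain (graph : List (Int × List Int)) :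
    ∀ (n f : Nat) (s : List Int) (vis : PySem.Dict Int Bool) (cnt : Int),
      s.length + pvU vis ≤ f → f ≤ n →
      pvLoopA graph f s vis cnt = pvFoldVis graph s (cnt, vis) := by
  intro n
  induction n with
  | zero =>
    intro f s vis cnt h hn
    have hf : f = 0 := by omega
    have hs : s = [] := by
      cases s with
      | nil => rfl
      | cons a t =>
        exfalso
        have : (a :: t).length = t.length + 1 := rfl
        omega
    subst hf hs; rfl
  | succ n ih =>
    intro f s vis cnt h hn
    cases s with
    | nil => rw [pvLoopA_nil]; rfl
    | cons u rest =>
      have hf1 : 1 ≤ f := by simp at h; omega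
      obtain ⟨f', rfl⟩ : ∃ f', f = f' + 1 := ⟨f - 1, by omega⟩
      show pvLoopA graph (f' + 1) (u :: rest) vis cnt = _
      simp only [pvLoopA]
      rw [pvInnerA_eq]
      set L := pvNbrs graph u with hL
      set W := (L.foldl pvCollect ([], vis)).1 with hW
      set vis' := (L.foldl pvCollect ([], vis)).2 with hvis'
      have hm := pvCollect_measure L [] vis
      simp only [List.length_nil, Nat.zero_add, ← hW, ← hvis'] at hm
      have hmeas : (W.reverse ++ rest).length + pvU vis' ≤ f' := by
        simp only [List.length_append, List.length_reverse]
        simp only [List.length_cons] at h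
        omega
      rw [ih f' (W.reverse ++ rest) vis' (cnt + (L.length : Int)) hmeas (by omega)]
      rw [pvFoldVis_append]
      -- right-hand side
      have hrhs : pvFoldVis graph (u :: rest) (cnt, vis) =
          pvFoldVis graph rest (cnt + (pvVis graph u vis).1, (pvVis graph u vis).2) := rfl
      rw [hrhs, pvVis_eq graph u vis]
      simp only [← hL, ← hW, ← hvis']
      rw [← pvFoldVis_shift graph W.reverse cnt (L.length : Int) vis']

-- ===== VERDICT (by name: the statement is the Claim_ definition above) =====
theorem dfs_spec : Claim_equal_dfs := by
  intro node graph visited _ _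
  show dfs node graph visited = dfs_alt node graph visited
  have key := pvMain graph (1 + pvU ((PySem.Dict.mk visited).insert node true))
      (1 + pvU ((PySem.Dict.mk visited).insert node true)) [node]
      ((PySem.Dict.mk visited).insert node true) 0 (by simp) (Nat.le_refl _)
  have h2 : (pvFoldVis graph [node] (0, (PySem.Dict.mk visited).insert node true)).1
      = (pvVisitB graph (pvU ((PySem.Dict.mk visited).insert node true) + 1) node
          ((PySem.Dict.mk visited).insert node true)).1 := by
    show 0 + (pvVis graph node ((PySem.Dict.mk visited).insert node true)).1 = _
    rw [Int.zero_add]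
    rfl
  show PySem.Int.floordiv
      (pvLoopA graph (1 + pvU ((PySem.Dict.mk visited).insert node true)) [node]
        ((PySem.Dict.mk visited).insert node true) 0).1 2 = _
  rw [key, h2]
  rfl
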